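-- pv_equiv track=rewrite | github.com/bbaranoff/qemu-calypso | gsm_clock.py | encode_l2_to_coded
-- ===== SOURCE A (Python) =====
-- def encode_l2_to_coded(l2_bytes):
--     """Encode 23 L2 bytes → 456 coded bits (conv code), return 4x114 interleaved."""
--     # 184 info bits
--     info = []
--     for byte in l2_bytes[:23]:
--         for i in range(7, -1, -1):
--             info.append((byte >> i) & 1)
--     info = (info + [0]*184)[:184]
--
--     # + 40 parity (zeros simplified) + 4 tail
--     full = info + [0]*40 + [0]*4  # 228 bits
--
--     # Conv encode
--     reg = 0
--     coded = []
--     for b in full: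
--         reg = ((reg << 1) | b) & 0x1F
--         g0 = ((reg >> 0) ^ (reg >> 3) ^ (reg >> 4)) & 1
--         g1 = ((reg >> 0) ^ (reg >> 1) ^ (reg >> 3) ^ (reg >> 4)) & 1
--         coded.extend([g0, g1])
--
--     # Interleave into 4 bursts of 114 bits
--     bursts = [[0]*114 for _ in range(4)]
--     for k in range(456):
--         bursts[k % 4][k // 4] = coded[k] if k < len(coded) else 0
--     return bursts
-- ===== SOURCE B (Python) =====
-- def encode_l2_to_coded(l2_bytes):
--     """Encode 23 L2 bytes -> 456 coded bits (conv code), return 4x114 interleaved."""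
--     # 228-bit full array (184 info bits, zero-padded, + 40 parity zeros + 4 tail)
--     info = []
--     for byte in l2_bytes[:23]:
--         for i in range(7, -1, -1):
--             info.append((byte >> i) & 1)
--     full = (info + [0]*228)[:228]
--
--     # Stateless convolutional encoding: direct tap XORs indexed back into `full`
--     # (an index < 0 reads the zero-initialised register), fused straight into
--     # the interleaved bursts: coded position k lives at bursts[k % 4][k // 4].
--     def tap(j):
--         return full[j] if j >= 0 else 0
--
--     def bit(k):
--         n, r = divmod(k, 2)
--         g = tap(n) ^ tap(n - 3) ^ tap(n - 4)
--         if r: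
--             g ^= tap(n - 1)
--         return g
--
--     return [[bit(4*j + i) for j in range(114)] for i in range(4)]
-- ===== Notes on version B (the rewrite author's own statement) =====
-- stated objective: alternative
-- what changed: Replaces the stateful shift-register encoder and the separate coded list + index-write interleaver by a stateless direct-tap formula (g-bit k computed from full[n], full[n-3], full[n-4] and, for odd k, full[n-1], with negative indices read as 0) fused into a nested comprehension that builds the 4x114 bursts directly.
import Mathlib
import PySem

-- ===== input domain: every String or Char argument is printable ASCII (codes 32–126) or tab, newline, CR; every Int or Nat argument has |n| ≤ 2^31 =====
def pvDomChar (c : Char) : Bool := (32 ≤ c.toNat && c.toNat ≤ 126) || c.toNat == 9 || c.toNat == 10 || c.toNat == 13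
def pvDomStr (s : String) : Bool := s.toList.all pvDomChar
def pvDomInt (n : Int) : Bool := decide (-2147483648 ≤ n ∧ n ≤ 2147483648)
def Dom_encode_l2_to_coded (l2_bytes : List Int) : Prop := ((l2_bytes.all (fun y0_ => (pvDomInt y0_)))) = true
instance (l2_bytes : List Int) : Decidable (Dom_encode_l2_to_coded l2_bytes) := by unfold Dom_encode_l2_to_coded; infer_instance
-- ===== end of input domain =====

-- B replaces A's stateful shift-register encoder and its separate coded-list + index-write
-- interleaver by a stateless direct-tap formula on the 228-bit frame, fused straight into the
-- 4x114 bursts (objective: alternative decomposition, same cost).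

-- ===== PORT A =====
-- info bits: for byte in l2_bytes[:23]: for i in range(7,-1,-1): info.append((byte >> i) & 1)
-- (i ∈ [0,7] here, so the Nat shift 'byte >>> i.toNat' is exactly Python's 'byte >> i')
def pvInnerLoopA (info : List Int) (byte : Int) : List Int :=
  (PySem.List.pyRange 7 (-1) (-1)).foldl (fun info i =>
    info ++ [PySem.Int.band (byte >>> i.toNat) 1]) info

def pvInfoA (l2_bytes : List Int) : List Int := (l2_bytes.take 23).foldl pvInnerLoopA []

-- full = (info + [0]*184)[:184] + [0]*40 + [0]*4
def pvFullA (l2_bytes : List Int) : List Int :=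
  ((pvInfoA l2_bytes ++ List.replicate 184 0).take 184) ++ List.replicate 40 0 ++ List.replicate 4 0

-- conv-encoder loop body: reg = ((reg << 1) | b) & 0x1F; coded += [g0, g1]
def pvStepA (s : Int × List Int) (b : Int) : Int × List Int :=
  let reg := PySem.Int.band (PySem.Int.bor (s.1 <<< (1 : Nat)) b) 0x1F
  let g0 := PySem.Int.band
    (PySem.Int.bxor (PySem.Int.bxor (reg >>> (0 : Nat)) (reg >>> (3 : Nat))) (reg >>> (4 : Nat))) 1
  let g1 := PySem.Int.band
    (PySem.Int.bxor (PySem.Int.bxor (PySem.Int.bxor (reg >>> (0 : Nat)) (reg >>> (1 : Nat)))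
      (reg >>> (3 : Nat))) (reg >>> (4 : Nat))) 1
  (reg, s.2 ++ [g0, g1])

def encode_l2_to_coded (l2_bytes : List Int) : List (List Int) :=
  let full := pvFullA l2_bytes
  let coded := (full.foldl pvStepA (0, [])).2
  -- bursts = [[0]*114 for _ in range(4)]
  -- for k in range(456): bursts[k % 4][k // 4] = coded[k] if k < len(coded) else 0
  -- (k ≥ 0, so Nat % and / agree with Python's; the in-place row assignment is modify/set)
  (List.range 456).foldl (fun bursts k =>
    bursts.modify (k % 4) (fun row => row.set (k / 4)
      (if k < coded.length then coded.getD k 0 else 0)))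
    ((List.range 4).map (fun _ => List.replicate 114 (0 : Int)))

-- ===== PORT B =====
-- same info-bit loop as Source B's first loop
def pvInnerLoopB (info : List Int) (byte : Int) : List Int :=
  (PySem.List.pyRange 7 (-1) (-1)).foldl (fun info i =>
    info ++ [PySem.Int.band (byte >>> i.toNat) 1]) info

def pvInfoB (l2_bytes : List Int) : List Int := (l2_bytes.take 23).foldl pvInnerLoopB []

-- full = (info + [0]*228)[:228]
def pvFullB (l2_bytes : List Int) : List Int :=
  (pvInfoB l2_bytes ++ List.replicate 228 0).take 228

-- tap(j) = full[j] if j >= 0 else 0  (every j used is < 228, so full[j] never raises: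
-- pyGet? is `some` there and the .getD 0 default is never taken)
def pvTapB (full : List Int) (j : Int) : Int :=
  if 0 ≤ j then (PySem.List.pyGet? full j).getD 0 else 0

-- bit(k): n, r = divmod(k, 2); g = tap(n)^tap(n-3)^tap(n-4); if r: g ^= tap(n-1)
-- (k ≥ 0, so Nat / and % agree with Python's divmod)
def pvBitB (full : List Int) (k : Nat) : Int :=
  let n : Int := (k / 2 : Nat)
  let g := PySem.Int.bxor (PySem.Int.bxor (pvTapB full n) (pvTapB full (n - 3))) (pvTapB full (n - 4))
  if k % 2 ≠ 0 then PySem.Int.bxor g (pvTapB full (n - 1)) else g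

def encode_l2_to_coded_alt (l2_bytes : List Int) : List (List Int) :=
  let full := pvFullB l2_bytes
  (List.range 4).map (fun i => (List.range 114).map (fun j => pvBitB full (4 * j + i)))

-- ===== PRECONDITION & SPEC =====
def Spec_encode_l2_to_coded (l2_bytes : List Int) (out : List (List Int)) : Prop := out = encode_l2_to_coded_alt l2_bytes
instance (l2_bytes : List Int) (out : List (List Int)) : Decidable (Spec_encode_l2_to_coded l2_bytes out) := by unfold Spec_encode_l2_to_coded; infer_instance

-- ===== CLAIM (what is proved, stated in full; the proofs are below) =====
def Claim_equal_encode_l2_to_coded : Prop := ∀ (l2_bytes : List Int), Dom_encode_l2_to_coded l2_bytes → Spec_encode_l2_to_coded l2_bytes (encode_l2_to_coded l2_bytes)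

-- ===== LEMMAS AND PROOFS =====

-- the 8 bits of one byte, msb first
def pvChunk (byte : Int) : List Int :=
  [PySem.Int.band (byte >>> 7) 1, PySem.Int.band (byte >>> 6) 1, PySem.Int.band (byte >>> 5) 1,
   PySem.Int.band (byte >>> 4) 1, PySem.Int.band (byte >>> 3) 1, PySem.Int.band (byte >>> 2) 1,
   PySem.Int.band (byte >>> 1) 1, PySem.Int.band (byte >>> 0) 1]

lemma pvInnerA_eq (info : List Int) (byte : Int) : pvInnerLoopA info byte = info ++ pvChunk byte := by
  unfold pvInnerLoopA
  rw [show PySem.List.pyRange 7 (-1) (-1) = [7,6,5,4,3,2,1,0] from by decide]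
  simp [List.foldl, pvChunk]

lemma pvInfoA_eq (l : List Int) : pvInfoA l = (l.take 23).flatMap pvChunk := by
  unfold pvInfoA
  rw [show pvInnerLoopA = fun info byte => info ++ pvChunk byte from
      funext fun i => funext fun b => pvInnerA_eq i b,
    PySem.List.foldl_append_eq_flatMap]
  simp

lemma pvInfoB_eq_infoA (l : List Int) : pvInfoB l = pvInfoA l := rfl

lemma pvInfoA_len (l : List Int) : (pvInfoA l).length ≤ 184 := by
  rw [pvInfoA_eq]
  have h : ∀ xs : List Int, (xs.flatMap pvChunk).length = 8 * xs.length := by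
    intro xs; induction xs with
    | nil => simp
    | cons a t ih => simp [pvChunk, ih]; ring
  rw [h]
  have := List.length_take_le 23 l
  omega

lemma pvBand_one_binary (y : Int) : PySem.Int.band y 1 = 0 ∨ PySem.Int.band y 1 = 1 := by
  rw [PySem.Int.band_one]
  have h1 := PySem.Int.mod_nonneg y (b := 2) (by omega)
  have h2 := PySem.Int.mod_lt y (b := 2) (by omega)
  omega

lemma pvInfoA_binary (l : List Int) : ∀ x ∈ pvInfoA l, x = 0 ∨ x = 1 := by
  rw [pvInfoA_eq]
  intro x hx
  rw [List.mem_flatMap] at hx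
  obtain ⟨b, _, hb⟩ := hx
  simp only [pvChunk, List.mem_cons, List.not_mem_nil, or_false] at hb
  rcases hb with rfl | rfl | rfl | rfl | rfl | rfl | rfl | rfl <;> exact pvBand_one_binary _

lemma pvFullA_eq (l : List Int) :
    pvFullA l = pvInfoA l ++ List.replicate (228 - (pvInfoA l).length) 0 := by
  unfold pvFullA
  have := pvInfoA_len l
  rw [List.take_append, List.take_of_length_le this, List.take_replicate,
    show min (184 - (pvInfoA l).length) 184 = 184 - (pvInfoA l).length by omega,
    List.append_assoc, List.append_assoc, ← List.replicate_add, ← List.replicate_add]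
  congr 2
  omega

lemma pvFullB_eq_fullA (l : List Int) : pvFullB l = pvFullA l := by
  unfold pvFullB
  have := pvInfoA_len l
  rw [pvInfoB_eq_infoA, pvFullA_eq, List.take_append, List.take_of_length_le (by omega),
    List.take_replicate]
  congr 2
  omega

lemma pvFullA_len (l : List Int) : (pvFullA l).length = 228 := by
  rw [pvFullA_eq]
  have := pvInfoA_len l
  simp
  omega

lemma pvFullA_binary (l : List Int) : ∀ x ∈ pvFullA l, x = 0 ∨ x = 1 := by
  rw [pvFullA_eq]
  intro x hx
  rw [List.mem_append] at hx
  rcases hx with hx | hx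
  · exact pvInfoA_binary l x hx
  · left; exact List.eq_of_mem_replicate hx

-- structural model of A's encoder fold
def pvEncRun (reg : Int) : List Int → List Int
  | [] => []
  | b :: t =>
    let s := pvStepA (reg, []) b
    s.2 ++ pvEncRun s.1 t

lemma pvFoldl_enc (l : List Int) : ∀ (reg : Int) (acc : List Int),
    (l.foldl pvStepA (reg, acc)).2 = acc ++ pvEncRun reg l := by
  induction l with
  | nil => intro reg acc; simp [pvEncRun]
  | cons b t ih =>
    intro reg acc
    simp only [List.foldl_cons, pvEncRun]
    rw [show pvStepA (reg, acc) b = ((pvStepA (reg, []) b).1, acc ++ (pvStepA (reg, []) b).2) from by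
      simp [pvStepA]]
    rw [ih]
    simp

-- B-shaped recursion: output pairs from the current bit and the last four bits of history
def pvTapsV (c0 c1 c2 c3 : Int) : List Int → List Int
  | [] => []
  | b :: t =>
    PySem.Int.band (PySem.Int.bxor (PySem.Int.bxor b c2) c3) 1 ::
    PySem.Int.band (PySem.Int.bxor (PySem.Int.bxor (PySem.Int.bxor b c0) c2) c3) 1 ::
    pvTapsV b c0 c1 c2 t

lemma pvEncRun_taps : ∀ (l : List Int) (c0 c1 c2 c3 c4 : Int),
    (∀ x ∈ l, x = 0 ∨ x = 1) →
    (c0 = 0 ∨ c0 = 1) → (c1 = 0 ∨ c1 = 1) → (c2 = 0 ∨ c2 = 1) →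
    (c3 = 0 ∨ c3 = 1) → (c4 = 0 ∨ c4 = 1) →
    pvEncRun (c0 + 2*c1 + 4*c2 + 8*c3 + 16*c4) l = pvTapsV c0 c1 c2 c3 l := by
  intro l
  induction l with
  | nil => intros; rfl
  | cons b t ih =>
    intro c0 c1 c2 c3 c4 hl h0 h1 h2 h3 h4
    have hb : b = 0 ∨ b = 1 := hl b (by simp)
    have hreg : PySem.Int.band (PySem.Int.bor ((c0 + 2*c1 + 4*c2 + 8*c3 + 16*c4) <<< (1:Nat)) b) 0x1F
        = b + 2*c0 + 4*c1 + 8*c2 + 16*c3 := by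
      rcases hb with rfl | rfl <;> rcases h0 with rfl | rfl <;> rcases h1 with rfl | rfl <;>
        rcases h2 with rfl | rfl <;> rcases h3 with rfl | rfl <;> rcases h4 with rfl | rfl <;> decide
    simp only [pvEncRun, pvStepA, pvTapsV]
    rw [hreg]
    have htl : ∀ x ∈ t, x = 0 ∨ x = 1 := fun x hx => hl x (by simp [hx])
    rw [ih b c0 c1 c2 c3 htl hb h0 h1 h2 h3]
    have e0 : PySem.Int.band
        (PySem.Int.bxor (PySem.Int.bxor ((b + 2*c0 + 4*c1 + 8*c2 + 16*c3) >>> (0:Nat))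
          ((b + 2*c0 + 4*c1 + 8*c2 + 16*c3) >>> (3:Nat))) ((b + 2*c0 + 4*c1 + 8*c2 + 16*c3) >>> (4:Nat))) 1
        = PySem.Int.band (PySem.Int.bxor (PySem.Int.bxor b c2) c3) 1 := by
      rcases hb with rfl | rfl <;> rcases h0 with rfl | rfl <;> rcases h1 with rfl | rfl <;>
        rcases h2 with rfl | rfl <;> rcases h3 with rfl | rfl <;> decide
    have e1 : PySem.Int.band
        (PySem.Int.bxor (PySem.Int.bxor (PySem.Int.bxor ((b + 2*c0 + 4*c1 + 8*c2 + 16*c3) >>> (0:Nat))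
          ((b + 2*c0 + 4*c1 + 8*c2 + 16*c3) >>> (1:Nat))) ((b + 2*c0 + 4*c1 + 8*c2 + 16*c3) >>> (3:Nat)))
          ((b + 2*c0 + 4*c1 + 8*c2 + 16*c3) >>> (4:Nat))) 1
        = PySem.Int.band (PySem.Int.bxor (PySem.Int.bxor (PySem.Int.bxor b c0) c2) c3) 1 := by
      rcases hb with rfl | rfl <;> rcases h0 with rfl | rfl <;> rcases h1 with rfl | rfl <;>
        rcases h2 with rfl | rfl <;> rcases h3 with rfl | rfl <;> decide
    rw [e0, e1]
    simp

-- tap with explicit history bits for negative offsets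
def pvHTap (c0 c1 c2 c3 : Int) (l : List Int) (j : Int) : Int :=
  if 0 ≤ j then l.getD j.toNat 0
  else if j = -1 then c0 else if j = -2 then c1 else if j = -3 then c2
  else if j = -4 then c3 else 0

lemma pvHTap_shift (b c0 c1 c2 c3 : Int) (t : List Int) (m : Int) (hm : -4 ≤ m) :
    pvHTap c0 c1 c2 c3 (b :: t) (m + 1) = pvHTap b c0 c1 c2 t m := by
  by_cases h : 0 ≤ m
  · have h1 : (0:Int) ≤ m + 1 := by omega
    have h2 : (m + 1).toNat = m.toNat + 1 := by omega
    simp [pvHTap, h, h1, h2]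
  · have hm4 : m = -1 ∨ m = -2 ∨ m = -3 ∨ m = -4 := by omega
    rcases hm4 with rfl | rfl | rfl | rfl <;> simp [pvHTap]

lemma pvTapsV_getD : ∀ (l : List Int) (c0 c1 c2 c3 : Int) (k : Nat), k < 2 * l.length →
    (∀ x ∈ l, x = 0 ∨ x = 1) →
    (c0 = 0 ∨ c0 = 1) → (c1 = 0 ∨ c1 = 1) → (c2 = 0 ∨ c2 = 1) → (c3 = 0 ∨ c3 = 1) →
    (pvTapsV c0 c1 c2 c3 l).getD k 0 =
      (let n : Int := (k / 2 : Nat)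
       let g := PySem.Int.bxor (PySem.Int.bxor (pvHTap c0 c1 c2 c3 l n)
         (pvHTap c0 c1 c2 c3 l (n - 3))) (pvHTap c0 c1 c2 c3 l (n - 4))
       if k % 2 ≠ 0 then PySem.Int.bxor g (pvHTap c0 c1 c2 c3 l (n - 1)) else g) := by
  intro l
  induction l with
  | nil => intro c0 c1 c2 c3 k hk; simp at hk
  | cons b t ih =>
    intro c0 c1 c2 c3 k hk hl h0 h1 h2 h3
    have hb : b = 0 ∨ b = 1 := hl b (by simp)
    match k with
    | 0 =>
      simp only [pvTapsV, List.getD]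
      show PySem.Int.band (PySem.Int.bxor (PySem.Int.bxor b c2) c3) 1 = _
      have t0 : pvHTap c0 c1 c2 c3 (b :: t) 0 = b := by simp [pvHTap]
      have t3 : pvHTap c0 c1 c2 c3 (b :: t) (-3) = c2 := by simp [pvHTap]
      have t4 : pvHTap c0 c1 c2 c3 (b :: t) (-4) = c3 := by simp [pvHTap]
      norm_num [t0, t3, t4]
      rcases hb with rfl | rfl <;> rcases h2 with rfl | rfl <;> rcases h3 with rfl | rfl <;> decide
    | 1 =>
      simp only [pvTapsV, List.getD]
      show PySem.Int.band (PySem.Int.bxor (PySem.Int.bxor (PySem.Int.bxor b c0) c2) c3) 1 = _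
      have t0 : pvHTap c0 c1 c2 c3 (b :: t) 0 = b := by simp [pvHTap]
      have t3 : pvHTap c0 c1 c2 c3 (b :: t) (-3) = c2 := by simp [pvHTap]
      have t4 : pvHTap c0 c1 c2 c3 (b :: t) (-4) = c3 := by simp [pvHTap]
      have t1 : pvHTap c0 c1 c2 c3 (b :: t) (-1) = c0 := by simp [pvHTap]
      norm_num [t0, t3, t4, t1]
      rcases hb with rfl | rfl <;> rcases h0 with rfl | rfl <;> rcases h2 with rfl | rfl <;>
        rcases h3 with rfl | rfl <;> decide
    | (k' + 2) =>
      have htl : ∀ x ∈ t, x = 0 ∨ x = 1 := fun x hx => hl x (by simp [hx])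
      have hk' : k' < 2 * t.length := by simp at hk; omega
      have := ih b c0 c1 c2 k' hk' htl hb h0 h1 h2
      simp only [pvTapsV, List.getD_cons_succ] at this ⊢
      rw [this]
      have hn : ((k' + 2) / 2 : Nat) = ((k' / 2 : Nat) : Int) + 1 := by omega
      have hsh : ∀ d : Int, -4 ≤ ((k' / 2 : Nat) : Int) - d → d ≤ 5 →
          pvHTap c0 c1 c2 c3 (b :: t) ((((k' + 2) / 2 : Nat) : Int) - d)
            = pvHTap b c0 c1 c2 t (((k' / 2 : Nat) : Int) - d) := by
        intro d hd _
        rw [hn, show ((k' / 2 : Nat) : Int) + 1 - d = (((k' / 2 : Nat) : Int) - d) + 1 by ring]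
        exact pvHTap_shift b c0 c1 c2 c3 t _ hd
      have hmod : (k' + 2) % 2 = k' % 2 := by omega
      simp only [hmod]
      rw [hsh 3 (by omega) (by omega), hsh 4 (by omega) (by omega), hsh 1 (by omega) (by omega), hn,
        pvHTap_shift b c0 c1 c2 c3 t ((k' / 2 : Nat) : Int) (by omega)]

lemma pvTapsV_len : ∀ (l : List Int) (c0 c1 c2 c3 : Int),
    (pvTapsV c0 c1 c2 c3 l).length = 2 * l.length := by
  intro l
  induction l with
  | nil => intros; rfl
  | cons b t ih => intro c0 c1 c2 c3; simp [pvTapsV, ih]; ring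

lemma pvHTap_zero (l : List Int) (j : Int) : pvHTap 0 0 0 0 l j = pvTapB l j := by
  by_cases h : 0 ≤ j
  · rw [pvHTap, pvTapB, if_pos h, if_pos h, PySem.List.pyGet?_of_nonneg (h := h),
      List.getD_eq_getElem?_getD]
  · simp only [pvHTap, pvTapB, if_neg h]
    split_ifs <;> rfl

-- A's coded list, elementwise, is B's bit formula
lemma pvCoded_eq_taps (l2 : List Int) :
    ((pvFullA l2).foldl pvStepA ((0 : Int), ([] : List Int))).2 = pvTapsV 0 0 0 0 (pvFullA l2) := by
  rw [pvFoldl_enc]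
  rw [show (0:Int) = 0 + 2*0 + 4*0 + 8*0 + 16*0 from by ring]
  rw [pvEncRun_taps (pvFullA l2) 0 0 0 0 0 (pvFullA_binary l2)
    (Or.inl rfl) (Or.inl rfl) (Or.inl rfl) (Or.inl rfl) (Or.inl rfl)]
  simp

lemma pvCoded_len (l2 : List Int) :
    (((pvFullA l2).foldl pvStepA ((0 : Int), ([] : List Int))).2).length = 456 := by
  rw [pvCoded_eq_taps, pvTapsV_len, pvFullA_len]

lemma pvCoded_getD (l2 : List Int) (k : Nat) (hk : k < 456) :
    (((pvFullA l2).foldl pvStepA ((0 : Int), ([] : List Int))).2).getD k 0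
      = pvBitB (pvFullB l2) k := by
  rw [pvCoded_eq_taps, pvTapsV_getD (pvFullA l2) 0 0 0 0 k
    (by rw [pvFullA_len]; omega) (pvFullA_binary l2)
    (Or.inl rfl) (Or.inl rfl) (Or.inl rfl) (Or.inl rfl)]
  simp only [pvHTap_zero, pvBitB, pvFullB_eq_fullA]

-- A's interleave fold, characterized elementwise
def pvFoldMat (v : Nat → Int) (n : Nat) : List (List Int) :=
  (List.range n).foldl (fun bursts k =>
    bursts.modify (k % 4) (fun row => row.set (k / 4) (v k)))
    ((List.range 4).map (fun _ => List.replicate 114 (0 : Int)))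

lemma pvInterleave (v : Nat → Int) : ∀ n, n ≤ 456 →
    (pvFoldMat v n).length = 4 ∧
    (∀ i, i < 4 → (((pvFoldMat v n).getD i []).length = 114 ∧
      ∀ j, j < 114 → ((pvFoldMat v n).getD i []).getD j 0
          = if 4 * j + i < n then v (4 * j + i) else 0)) := by
  intro n
  induction n with
  | zero =>
    intro _
    have h0 : pvFoldMat v 0 = List.replicate 4 (List.replicate 114 (0:Int)) := rfl
    refine ⟨by rw [h0]; rfl, fun i hi => ⟨?_, fun j hj => ?_⟩⟩
    · rw [h0, List.getD_replicate _ hi]; rfl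
    · rw [h0, List.getD_replicate _ hi, List.getD_replicate _ hj]
      simp
  | succ m ih =>
    intro hm
    obtain ⟨hlen, hrows⟩ := ih (by omega)
    rw [show pvFoldMat v (m+1) = (pvFoldMat v m).modify (m % 4) (fun row => row.set (m / 4) (v m)) from by
      simp [pvFoldMat, List.range_succ]]
    set M := pvFoldMat v m with hM
    have hmod4 : m % 4 < 4 := by omega
    have hdiv4 : m / 4 < 114 := by omega
    refine ⟨by simp [List.length_modify, hlen], fun i hi => ?_⟩
    obtain ⟨hrlen, hrval⟩ := hrows i hi
    have hget : (M.modify (m % 4) (fun row => row.set (m / 4) (v m))).getD i []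
        = if i = m % 4 then (M.getD i []).set (m / 4) (v m) else M.getD i [] := by
      have h1 : (M.modify (m % 4) (fun row => row.set (m / 4) (v m)))[i]?
          = if m % 4 = i then Option.map (fun row => row.set (m / 4) (v m)) M[i]? else M[i]? := by
        rw [List.getElem?_modify]
        cases M[i]? <;> simp
        split <;> rfl
      have h2 : M[i]? = some (M.getD i []) := by
        rw [List.getD_eq_getElem?_getD] at *
        cases h : M[i]? with
        | none => exfalso; rw [List.getElem?_eq_none_iff] at h; omega
        | some r => simp
      by_cases hc : i = m % 4
      · subst hc
        rw [if_pos rfl, List.getD_eq_getElem?_getD, h1, if_pos rfl, h2, List.getD_eq_getElem?_getD, h2]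
        rfl
      · rw [if_neg hc, List.getD_eq_getElem?_getD, h1, if_neg (fun h => hc h.symm),
          ← List.getD_eq_getElem?_getD]
    rw [hget]
    by_cases hc : i = m % 4
    · subst hc
      rw [if_pos rfl]
      refine ⟨by rw [List.length_set]; exact hrlen, fun j hj => ?_⟩
      have hsv : ((M.getD (m % 4) []).set (m / 4) (v m)).getD j 0
          = if j = m / 4 then v m else (M.getD (m % 4) []).getD j 0 := by
        by_cases hj4 : j = m / 4
        · rw [if_pos hj4, hj4, List.getD_eq_getElem?_getD, List.getElem?_set, if_pos rfl,
            if_pos (by rw [hrlen]; omega)]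
          rfl
        · rw [if_neg hj4, List.getD_eq_getElem?_getD, List.getElem?_set,
            if_neg (fun h => hj4 h.symm), ← List.getD_eq_getElem?_getD]
      rw [hsv]
      by_cases hj4 : j = m / 4
      · rw [if_pos hj4, hj4, show 4 * (m / 4) + m % 4 = m from by omega, if_pos (by omega)]
      · rw [if_neg hj4, hrval j hj]
        by_cases hlt : 4 * j + m % 4 < m
        · rw [if_pos hlt, if_pos (by omega)]
        · rw [if_neg hlt, if_neg (by omega)]
    · rw [if_neg hc]
      refine ⟨hrlen, fun j hj => ?_⟩
      rw [hrval j hj]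
      by_cases hlt : 4 * j + i < m
      · rw [if_pos hlt, if_pos (by omega)]
      · rw [if_neg hlt, if_neg (by omega)]

-- ===== VERDICT (by name: the statement is the Claim_ definition above) =====
set_option maxRecDepth 4096 in
theorem encode_l2_to_coded_spec : Claim_equal_encode_l2_to_coded := by
  intro l2 _
  unfold Spec_encode_l2_to_coded
  have hmain : ∀ (cd : List Int), cd = ((pvFullA l2).foldl pvStepA ((0:Int), ([] : List Int))).2 →
      pvFoldMat (fun k => if k < cd.length then cd.getD k 0 else 0) 456
        = encode_l2_to_coded_alt l2 := by
    intro cd hcd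
    have hcl : cd.length = 456 := by rw [hcd]; exact pvCoded_len l2
    have hcg : ∀ k : Nat, k < 456 → cd.getD k 0 = pvBitB (pvFullB l2) k := by
      intro k hk; rw [hcd]; exact pvCoded_getD l2 k hk
    obtain ⟨hlen, hrows⟩ := pvInterleave (fun k => if k < cd.length then cd.getD k 0 else 0) 456 (le_refl _)
    unfold encode_l2_to_coded_alt
    apply List.ext_getElem
    · rw [hlen]; simp
    · intro i hi1 hi2
      have hi : i < 4 := by rw [hlen] at hi1; exact hi1
      obtain ⟨hrlen, hrval⟩ := hrows i hi
      rw [List.getElem_map, List.getElem_range, ← List.getD_eq_getElem _ ([] : List Int) hi1]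
      apply List.ext_getElem
      · rw [hrlen]; simp
      · intro j hj1 hj2
        have hj : j < 114 := by rw [hrlen] at hj1; exact hj1
        rw [List.getElem_map, List.getElem_range, ← List.getD_eq_getElem _ (0 : Int) hj1,
          hrval j hj, if_pos (by omega : 4 * j + i < 456),
          if_pos (by rw [hcl]; omega), hcg (4 * j + i) (by omega)]
  exact hmain _ rfl
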